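-- pv_equiv track=rewrite | github.com/Pydare/Algorithm-Problems | forloopchallenge/main.py | bookReading
-- ===== SOURCE A (Python) =====
-- def bookReading(n,m):
--     p = []
--     for i in range(1,n+1):
--         if i%m == 0:
--             if i>9:
--                 i = int(str(i)[-1])
--             p.append(i)
--     total = sum(p)
--     return(total)
-- ===== SOURCE B (Python) =====
-- def bookReading(n, m):
--     # closed form over the period-10 cycle of last digits of multiples of |m|
--     d = abs(m)
--     K = n // d
--     if K <= 0:
--         return 0
--     block = sum(k * d % 10 for k in range(1, 11))
--     q, r = divmod(K, 10)
--     return q * block + sum(k * d % 10 for k in range(1, r + 1))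
-- ===== Notes on version B (the rewrite author's own statement) =====
-- stated objective: faster
-- what changed: Replaces the O(n) loop over 1..n with an O(1) closed form: last digits of multiples of |m| repeat with period 10, so the answer is (full cycles)*(cycle sum) plus the partial cycle.
-- outside the precondition, e.g. on bookReading(10, 0): A raises ZeroDivisionError, B raises ZeroDivisionError; on bookReading(0, 0): A returns 0, B raises ZeroDivisionError
import Mathlib
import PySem

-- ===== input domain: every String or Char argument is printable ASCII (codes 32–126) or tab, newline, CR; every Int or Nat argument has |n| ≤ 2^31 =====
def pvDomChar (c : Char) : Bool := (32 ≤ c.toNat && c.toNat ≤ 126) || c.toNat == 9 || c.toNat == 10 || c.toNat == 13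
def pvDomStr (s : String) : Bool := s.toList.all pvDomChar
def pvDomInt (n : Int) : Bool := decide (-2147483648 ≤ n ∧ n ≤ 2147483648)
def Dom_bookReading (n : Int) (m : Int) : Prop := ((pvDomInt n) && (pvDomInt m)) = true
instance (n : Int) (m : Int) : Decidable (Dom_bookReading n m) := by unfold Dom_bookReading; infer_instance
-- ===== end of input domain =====

-- B replaces A's O(n) loop by the O(1) period-10 closed form for the sum of last digits of multiples of |m|.

-- ===== PORT A =====
-- int(str(i)[-1]): str(i) is nonempty, so the index never raises; the 0 defaults are unreachable.
def pyLastDigitStr (i : Int) : Int :=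
  match PySem.Chars.pyGet? (PySem.Int.toChars i) (-1) with
  | some c => (PySem.Int.ofChars? [c]).getD 0
  | none => 0

def bookReading (n : Int) (m : Int) : Int :=
  let p := (PySem.List.pyRange 1 (n + 1) 1).foldl
    (fun p i =>
      if PySem.Int.mod i m == 0 then
        p ++ [if i > 9 then pyLastDigitStr i else i]
      else p) []
  p.sum

-- ===== PORT B =====
def bookReading_alt (n : Int) (m : Int) : Int :=
  let d := |m|
  let K := PySem.Int.floordiv n d
  if K ≤ 0 then 0
  else
    let block := ((PySem.List.pyRange 1 11 1).map (fun k => PySem.Int.mod (k * d) 10)).sum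
    let q := PySem.Int.floordiv K 10
    let r := PySem.Int.mod K 10
    q * block + ((PySem.List.pyRange 1 (r + 1) 1).map (fun k => PySem.Int.mod (k * d) 10)).sum

-- ===== PRECONDITION & SPEC =====
-- Pre_ excludes m = 0: for n >= 1 Python's `i % m` raises ZeroDivisionError in A; for n <= 0 A's empty loop returns 0 but B's `n // abs(m)` naturally raises there too.
def Pre_bookReading (n : Int) (m : Int) : Prop := m ≠ 0
instance (n : Int) (m : Int) : Decidable (Pre_bookReading n m) := by unfold Pre_bookReading; infer_instance
def pvWitness_bookReading : Int × Int := (25, 3)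

def Spec_bookReading (n : Int) (m : Int) (out : Int) : Prop := out = bookReading_alt n m
instance (n : Int) (m : Int) (out : Int) : Decidable (Spec_bookReading n m out) := by unfold Spec_bookReading; infer_instance

-- ===== CLAIM (what is proved, stated in full; the proofs are below) =====
def Claim_equal_bookReading : Prop := ∀ (n : Int) (m : Int), Dom_bookReading n m → Pre_bookReading n m → Spec_bookReading n m (bookReading n m)

-- ===== LEMMAS AND PROOFS =====

-- proof-only: B's body as a function of d = |m| and K = n // d
def pvG (d K : Int) : Int :=
  if K ≤ 0 then 0
  else
    PySem.Int.floordiv K 10 * ((PySem.List.pyRange 1 11 1).map (fun k => PySem.Int.mod (k * d) 10)).sum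
      + ((PySem.List.pyRange 1 (PySem.Int.mod K 10 + 1) 1).map (fun k => PySem.Int.mod (k * d) 10)).sum

-- the same closed form without the guard, valid for K ≥ 0
def pvH (d K : Int) : Int :=
  K / 10 * ((PySem.List.pyRange 1 11 1).map (fun k => PySem.Int.mod (k * d) 10)).sum
    + ((PySem.List.pyRange 1 (K % 10 + 1) 1).map (fun k => PySem.Int.mod (k * d) 10)).sum

lemma alt_eq_pvG (n m : Int) : bookReading_alt n m = pvG |m| (PySem.Int.floordiv n |m|) := rfl

lemma digitChar_val (r : Nat) (hr : r < 10) :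
    (PySem.Int.ofChars? [Nat.digitChar r]).getD 0 = (r : Int) := by
  interval_cases r <;> decide

lemma lastDigit_eq (i : Int) (hi : 9 < i) : pyLastDigitStr i = PySem.Int.mod i 10 := by
  have h0 : ¬ i < 0 := by omega
  have ht : 10 ≤ i.toNat := by omega
  unfold pyLastDigitStr
  simp only [PySem.Chars.pyGet?]
  rw [PySem.Int.toChars, if_neg h0, Nat.toDigits_of_base_le (by norm_num) ht,
      PySem.List.pyGet?_neg_one_append_singleton]
  show (PySem.Int.ofChars? [(i.toNat % 10).digitChar]).getD 0 = PySem.Int.mod i 10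
  rw [digitChar_val _ (Nat.mod_lt _ (by norm_num))]
  rw [PySem.Int.mod_eq_emod_of_pos (by norm_num)]
  omega

lemma pvG_eq_pvH (d K : Int) (hK : 0 ≤ K) : pvG d K = pvH d K := by
  unfold pvG pvH
  rcases lt_or_eq_of_le hK with h | h
  · rw [if_neg (by omega), PySem.Int.floordiv_eq_ediv_of_pos (by norm_num),
        PySem.Int.mod_eq_emod_of_pos (by norm_num)]
  · rw [← h, if_pos le_rfl]
    have h1 : PySem.List.pyRange 1 ((0:Int) % 10 + 1) 1 = [] := by decide
    norm_num [h1]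

lemma pvH_succ (d K : Int) (_hK : 0 ≤ K) :
    pvH d (K + 1) = pvH d K + PySem.Int.mod ((K + 1) * d) 10 := by
  unfold pvH
  have h10 : (0:Int) < 10 := by norm_num
  by_cases hc : K % 10 = 9
  · have hq : (K + 1) / 10 = K / 10 + 1 := by omega
    have hm : (K + 1) % 10 = 0 := by omega
    have hKe1 : K + 1 = 10 * (K / 10 + 1) := by omega
    have hz1 : PySem.Int.mod ((K + 1) * d) 10 = 0 := by
      rw [PySem.Int.mod_eq_emod_of_pos h10, hKe1, mul_assoc]
      exact Int.mul_emod_right 10 _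
    have hz2 : PySem.Int.mod ((10:Int) * d) 10 = 0 := by
      rw [PySem.Int.mod_eq_emod_of_pos h10]; exact Int.mul_emod_right 10 d
    have hsplit : PySem.List.pyRange (1:Int) 11 1 = PySem.List.pyRange (1:Int) 10 1 ++ [10] := by decide
    have he : PySem.List.pyRange (1:Int) ((0:Int) + 1) 1 = [] := by decide
    rw [hq, hm, hc, hz1, he, hsplit]
    have h910 : ((9:Int) + 1) = 10 := by norm_num
    rw [h910]
    simp only [List.map_append, List.sum_append, List.map_cons, List.map_nil,
      List.sum_cons, List.sum_nil, hz2]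
    ring
  · have hr0 : 0 ≤ K % 10 := Int.emod_nonneg K (by norm_num)
    have hq : (K + 1) / 10 = K / 10 := by omega
    have hm : (K + 1) % 10 = K % 10 + 1 := by omega
    have hsplit : PySem.List.pyRange (1:Int) (K % 10 + 1 + 1) 1
        = PySem.List.pyRange (1:Int) (K % 10 + 1) 1 ++ [K % 10 + 1] :=
      PySem.List.pyRange_one_succ_right (by omega)
    rw [hq, hm, hsplit]
    simp only [List.map_append, List.sum_append, List.map_cons, List.map_nil,
      List.sum_cons, List.sum_nil]
    have hmodeq : PySem.Int.mod ((K % 10 + 1) * d) 10 = PySem.Int.mod ((K + 1) * d) 10 := by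
      rw [PySem.Int.mod_eq_emod_of_pos h10, PySem.Int.mod_eq_emod_of_pos h10]
      have h1 : K + 1 = K % 10 + 1 + 10 * (K / 10) := by omega
      calc ((K % 10 + 1) * d) % 10
          = ((K % 10 + 1) * d + 10 * (K / 10 * d)) % 10 := by
            rw [Int.add_mul_emod_self_left]
        _ = ((K + 1) * d) % 10 := by rw [h1]; ring_nf
    rw [hmodeq]; ring

lemma pvG_succ (d q : Int) (hq : 0 ≤ q) :
    pvG d (q + 1) = pvG d q + PySem.Int.mod ((q + 1) * d) 10 := by
  rw [pvG_eq_pvH d q hq, pvG_eq_pvH d (q + 1) (by omega)]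
  exact pvH_succ d q hq

lemma ediv_succ_of_dvd (d N : Int) (hd : 0 < d) (h : d ∣ (N + 1)) :
    (N + 1) / d = N / d + 1 := by
  obtain ⟨c, hc⟩ := h
  have h2 : (d - 1) + d * (c - 1) = d * c - 1 := by ring
  have hN : N = (d - 1) + d * (c - 1) := by omega
  rw [hc, Int.mul_ediv_cancel_left _ (by omega), hN,
      Int.add_mul_ediv_left _ _ (by omega), Int.ediv_eq_zero_of_lt (by omega) (by omega)]
  ring

lemma ediv_succ_of_not_dvd (d N : Int) (hd : 0 < d) (h : ¬ d ∣ (N + 1)) :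
    (N + 1) / d = N / d := by
  have hr0 : 0 ≤ N % d := Int.emod_nonneg N (by omega)
  have hr1 : N % d < d := Int.emod_lt_of_pos N hd
  have hEq : d * (N / d) + N % d = N := Int.mul_ediv_add_emod N d
  by_cases h1 : N % d + 1 = d
  · exfalso
    apply h
    refine ⟨N / d + 1, ?_⟩
    have : d * (N / d + 1) = d * (N / d) + d := by ring
    omega
  · have hN1 : N + 1 = (N % d + 1) + d * (N / d) := by omega
    rw [hN1, Int.add_mul_ediv_left _ _ (by omega),
        Int.ediv_eq_zero_of_lt (by omega) (by omega), zero_add]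

lemma test_congr (m i : Int) :
    (PySem.Int.mod i m == 0) = (PySem.Int.mod i |m| == 0) := by
  rw [Bool.eq_iff_iff]
  simp only [beq_iff_eq, PySem.Int.mod_eq_zero_iff_dvd, abs_dvd]

lemma main_sum (d : Int) (hd : 0 < d) (N : Nat) :
    ((((PySem.List.pyRange 1 ((N : Int) + 1) 1).filter
        (fun i => PySem.Int.mod i d == 0)).map (fun i => PySem.Int.mod i 10)).sum)
      = pvG d (PySem.Int.floordiv (N : Int) d) := by
  induction N with
  | zero =>
      have h1 : PySem.List.pyRange (1:Int) ((0:Nat) + 1) 1 = [] := by decide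
      rw [h1, PySem.Int.floordiv_eq_ediv_of_pos hd]
      norm_num [pvG]
  | succ k ih =>
      have hcast : ((k + 1 : Nat) : Int) = (k : Int) + 1 := by push_cast; ring
      have hk0 : (0:Int) ≤ (k : Int) := by positivity
      have hsplit : PySem.List.pyRange (1:Int) ((k : Int) + 1 + 1) 1
          = PySem.List.pyRange (1:Int) ((k : Int) + 1) 1 ++ [(k : Int) + 1] :=
        PySem.List.pyRange_one_succ_right (by omega)
      rw [hcast, hsplit, List.filter_append, List.map_append, List.sum_append]
      rw [PySem.Int.floordiv_eq_ediv_of_pos hd] at ih ⊢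
      have hq0 : 0 ≤ (k : Int) / d := Int.ediv_nonneg hk0 (by omega)
      by_cases hdvd : d ∣ ((k : Int) + 1)
      · have htest : (PySem.Int.mod ((k : Int) + 1) d == 0) = true := by
          simp [PySem.Int.mod_eq_zero_iff_dvd, hdvd]
        rw [ediv_succ_of_dvd d _ hd hdvd, pvG_succ d _ hq0, ← ih]
        simp only [List.filter_cons, htest, List.filter_nil, List.map_cons, List.map_nil,
          List.sum_cons, List.sum_nil, if_true]
        have hmul : ((k : Int) / d + 1) * d = (k : Int) + 1 := by
          obtain ⟨c, hc⟩ := hdvd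
          have h2 : (d - 1) + d * (c - 1) = d * c - 1 := by ring
          have hN : (k : Int) = (d - 1) + d * (c - 1) := by omega
          have h3 : (k : Int) / d = c - 1 := by
            rw [hN, Int.add_mul_ediv_left _ _ (by omega),
                Int.ediv_eq_zero_of_lt (by omega) (by omega), zero_add]
          have h4 : ((k : Int) / d + 1) * d = d * c := by rw [h3]; ring
          omega
        rw [hmul]
        ring
      · have htest : (PySem.Int.mod ((k : Int) + 1) d == 0) = false := by
          simp [PySem.Int.mod_eq_zero_iff_dvd, hdvd]
        rw [ediv_succ_of_not_dvd d _ hd hdvd, ← ih]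
        simp only [List.filter_cons, htest, List.filter_nil, List.map_nil,
          List.sum_nil, Bool.false_eq_true, if_false]
        ring

lemma value_congr (n i : Int) (hi : i ∈ PySem.List.pyRange 1 (n + 1) 1) :
    (if i > 9 then pyLastDigitStr i else i) = PySem.Int.mod i 10 := by
  have h1 : 1 ≤ i ∧ i < n + 1 := (PySem.List.mem_pyRange_one).1 hi
  by_cases h9 : i > 9
  · rw [if_pos h9, lastDigit_eq i h9]
  · rw [if_neg h9, PySem.Int.mod_eq_emod_of_pos (by norm_num)]
    omega

-- ===== VERDICT (by name: the statement is the Claim_ definition above) =====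
theorem bookReading_spec : Claim_equal_bookReading := by
  unfold Claim_equal_bookReading Spec_bookReading Pre_bookReading
  intro n m _ hm
  have hd : 0 < |m| := abs_pos.mpr hm
  rw [alt_eq_pvG]
  show ((PySem.List.pyRange 1 (n + 1) 1).foldl
      (fun p i =>
        if PySem.Int.mod i m == 0 then
          p ++ [if i > 9 then pyLastDigitStr i else i]
        else p) []).sum = pvG |m| (PySem.Int.floordiv n |m|)
  rw [PySem.List.foldl_append_if (fun i => PySem.Int.mod i m == 0)
        (fun i => if i > 9 then pyLastDigitStr i else i), List.nil_append]
  rw [List.filter_congr (fun i _ => test_congr m i)]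
  rw [List.map_congr_left (fun i hi =>
        value_congr n i (List.mem_of_mem_filter hi))]
  by_cases hn : 0 < n
  · have hcast : ((n.toNat : Nat) : Int) = n := Int.toNat_of_nonneg (by omega)
    have := main_sum |m| hd n.toNat
    rw [hcast] at this
    exact this
  · have hempty : PySem.List.pyRange (1:Int) (n + 1) 1 = [] := by
      apply List.eq_nil_iff_forall_not_mem.2
      intro i hi
      have h1 := (PySem.List.mem_pyRange_one).1 hi
      omega
    rw [hempty]
    have hK : PySem.Int.floordiv n |m| ≤ 0 := by
      have h1 : PySem.Int.floordiv n |m| < 1 := by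
        rw [PySem.Int.floordiv_lt_iff_lt_mul hd]
        omega
      omega
    simp [pvG, hK]
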